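-- pv_equiv track=rewrite | github.com/pearl-natalia/Siren | functions/location.py | format_address
-- ===== SOURCE A (Python) =====
-- def format_address(current_street):
--     if current_street is None:
--         return None
--     long_form = {
--         " N": " North", " E": " East", " S": " South", " W": " West",
--         " Rd": " Road", " St": " Street", " Av": " Avenue",
--         " Blvd": " Boulevard", " Dr": " Drive"
--     }
--     for abbreviation, full in long_form.items(): # abbreviations with spaces
--         current_street = current_street.replace(abbreviation + " ", full + " ")
--     for abbreviation, full in long_form.items(): # abbreviations without spaces
--         if current_street.endswith(abbreviation):
--             current_street = current_street[:-len(abbreviation)] + full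
--     return current_street
-- ===== SOURCE B (Python) =====
-- FULL = {"N": "North", "E": "East", "S": "South", "W": "West",
--         "Rd": "Road", "St": "Street", "Av": "Avenue",
--         "Blvd": "Boulevard", "Dr": "Drive"}
--
--
-- def format_address(current_street):
--     if current_street is None:
--         return None
--     first, *rest = current_street.split(" ")
--     return " ".join([first] + [FULL.get(word, word) for word in rest])
-- ===== Notes on version B (the rewrite author's own statement) =====
-- stated objective: idiomatic
-- what changed: A makes 9 sequential whole-string str.replace passes plus 9 endswith suffix fixes; B splits the street once on spaces, expands each abbreviation word by one dict lookup, and joins.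
-- intended difference: On streets where the same abbreviation word occurs twice in a row with more text after it (e.g. 'a N N b'), A returns the second occurrence unexpanded because its replace pass consumed the space the two occurrences share, while B expands every abbreviation word, which is the intended expansion. — e.g. on format_address(some "a N N b"): A returns some "a North N b", B returns some "a North North b"
import Mathlib
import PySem

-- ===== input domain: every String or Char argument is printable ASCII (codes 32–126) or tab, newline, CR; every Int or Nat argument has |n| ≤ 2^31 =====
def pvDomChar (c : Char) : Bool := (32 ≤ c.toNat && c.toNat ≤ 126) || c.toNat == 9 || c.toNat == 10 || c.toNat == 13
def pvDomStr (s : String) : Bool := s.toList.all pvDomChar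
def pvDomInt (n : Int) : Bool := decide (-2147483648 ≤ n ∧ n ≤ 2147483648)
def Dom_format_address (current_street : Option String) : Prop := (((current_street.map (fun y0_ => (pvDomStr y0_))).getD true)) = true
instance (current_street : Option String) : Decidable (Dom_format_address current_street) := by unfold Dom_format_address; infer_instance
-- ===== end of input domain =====

-- B replaces A's 9 str.replace passes + 9 endswith fixes by one split-on-space / map / join;
-- return values proved equal outside D_ (adjacent repeated abbreviation words, where A misses one).

-- ===== PORT A =====
def pvLongForm : List (String × String) :=
  [(" N", " North"), (" E", " East"), (" S", " South"), (" W", " West"),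
   (" Rd", " Road"), (" St", " Street"), (" Av", " Avenue"),
   (" Blvd", " Boulevard"), (" Dr", " Drive")]

def format_address (current_street : Option String) : Option String :=
  match current_street with
  | none => none
  | some s0 =>
    -- for abbreviation, full in long_form.items(): current_street = current_street.replace(abbreviation + " ", full + " ")
    let s1 := pvLongForm.foldl (fun s p => PySem.Str.replace s (p.1 ++ " ") (p.2 ++ " ")) s0
    -- for abbreviation, full in long_form.items(): if current_street.endswith(abbreviation): ...
    let s2 := pvLongForm.foldl (fun s p =>
      if PySem.Str.endswith s p.1 then
        PySem.Str.slice s none (some (-(PySem.Str.len p.1))) ++ p.2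
      else s) s1
    some s2

-- ===== PORT B =====
def pvFull : List (List Char × List Char) :=
  [(['N'], ['N','o','r','t','h']), (['E'], ['E','a','s','t']), (['S'], ['S','o','u','t','h']),
   (['W'], ['W','e','s','t']), (['R','d'], ['R','o','a','d']), (['S','t'], ['S','t','r','e','e','t']),
   (['A','v'], ['A','v','e','n','u','e']), (['B','l','v','d'], ['B','o','u','l','e','v','a','r','d']),
   (['D','r'], ['D','r','i','v','e'])]

-- FULL.get(word, word): first-match lookup in the association list (exact for a dict literal with distinct keys)
def pvLookup (w : List Char) : List Char :=
  match pvFull.find? (fun p => p.1 == w) with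
  | some p => p.2
  | none => w

def format_address_alt (current_street : Option String) : Option String :=
  match current_street with
  | none => none
  | some s =>
    match PySem.Chars.splitOn s.toList [' '] with
    | [] => some s  -- unreachable: str.split(" ") always returns at least one word
    | first :: rest =>
      some (String.ofList (PySem.Chars.join [' '] (first :: rest.map pvLookup)))

-- ===== PRECONDITION & SPEC =====
-- D_ helpers (independent of the ports): the abbreviation keys, and the Boolean
-- "some word after the first is immediately followed by an equal abbreviation word and is not next-to-last".
-- On streets where the same abbreviation word occurs twice in a row with more text after it
-- (e.g. "a N N b"), A returns the second occurrence unexpanded because its first replace pass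
-- consumed the space the two occurrences share; B expands every abbreviation word, which is the
-- intended expansion.
def D_format_address (current_street : Option String) : Prop :=
  (current_street.elim false (fun t =>
    PySem.Chars.isIn " N N ".toList t.toList || PySem.Chars.isIn " E E ".toList t.toList ||
    PySem.Chars.isIn " S S ".toList t.toList || PySem.Chars.isIn " W W ".toList t.toList ||
    PySem.Chars.isIn " Rd Rd ".toList t.toList || PySem.Chars.isIn " St St ".toList t.toList ||
    PySem.Chars.isIn " Av Av ".toList t.toList || PySem.Chars.isIn " Blvd Blvd ".toList t.toList ||
    PySem.Chars.isIn " Dr Dr ".toList t.toList)) = true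
instance (current_street : Option String) : Decidable (D_format_address current_street) := by unfold D_format_address; infer_instance

def Spec_format_address (current_street : Option String) (out : Option String) : Prop := ¬ D_format_address current_street → out = format_address_alt current_street
instance (current_street : Option String) (out : Option String) : Decidable (Spec_format_address current_street out) := by unfold Spec_format_address; infer_instance

def pvDiffWitness_format_address : Option String := some "a N N b"
def pvDiffWitnessOut_format_address : (Option String) × (Option String) :=
  (some "a North N b", some "a North North b")

-- ===== CLAIM (what is proved, stated in full; the proofs are below) =====
def Claim_unchanged_format_address : Prop := ∀ (current_street : Option String), Dom_format_address current_street → Spec_format_address current_street (format_address current_street)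
def Claim_changed_format_address : Prop := Dom_format_address (pvDiffWitness_format_address) ∧ D_format_address (pvDiffWitness_format_address) ∧ format_address (pvDiffWitness_format_address) = pvDiffWitnessOut_format_address.1 ∧ format_address_alt (pvDiffWitness_format_address) = pvDiffWitnessOut_format_address.2 ∧ pvDiffWitnessOut_format_address.1 ≠ pvDiffWitnessOut_format_address.2
def Claim_exact_format_address : Prop := ∀ (current_street : Option String), Dom_format_address current_street → D_format_address current_street → format_address current_street ≠ format_address_alt current_street

-- ===== LEMMAS AND PROOFS =====

-- words of a string: first word, and the remaining (space, word) groups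
def splW : List Char → List Char × List (List Char)
  | [] => ([], [])
  | c :: tl => if c = ' ' then ([], (splW tl).1 :: (splW tl).2) else (c :: (splW tl).1, (splW tl).2)

def tailStr (ws : List (List Char)) : List Char := ws.flatMap (fun w => ' ' :: w)

-- fuel-free form of PySem.Chars.replace for a nonempty pattern
def repC (p0 : Char) (ps rep : List Char) : List Char → List Char
  | [] => []
  | c :: tl =>
    if (p0 :: ps).isPrefixOf (c :: tl) then rep ++ repC p0 ps rep (tl.drop ps.length)
    else c :: repC p0 ps rep tl
termination_by l => l.length
decreasing_by
  all_goals simp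

-- word-level model of one replace pass " t " -> " f " (flag: previous word's trailing space consumed)
def goP (t f : List Char) : Bool → List (List Char) → List (List Char)
  | _, [] => []
  | flag, w :: rest =>
    if w = t ∧ rest ≠ [] ∧ flag = false then f :: goP t f true rest
    else w :: goP t f false rest

-- word-level model of one endswith fix: replace the last tail-word if it equals t
def endfixW (t f : List Char) : List (List Char) → List (List Char)
  | [] => []
  | w :: rest => if rest = [] then [if w = t then f else w] else w :: endfixW t f rest

-- goP with the endswith fix folded in
def goPE (t f : List Char) : Bool → List (List Char) → List (List Char)
  | _, [] => []
  | flag, w :: rest =>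
    if rest = [] then [if w = t then f else w]
    else if w = t ∧ flag = false then f :: goPE t f true rest
    else w :: goPE t f false rest

lemma goP_length (t f : List Char) : ∀ b ws, (goP t f b ws).length = ws.length := by
  intro b ws
  induction ws generalizing b with
  | nil => simp [goP]
  | cons w rest ih => simp only [goP]; split <;> simp [ih]

lemma goP_ne_nil (t f : List Char) (b : Bool) {rest : List (List Char)} (h : rest ≠ []) :
    goP t f b rest ≠ [] := by
  intro hc
  have hl := goP_length t f b rest
  rw [hc] at hl
  exact h (List.length_eq_zero_iff.mp hl.symm)

lemma endfixW_length (t f : List Char) : ∀ ws, (endfixW t f ws).length = ws.length := by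
  intro ws
  induction ws with
  | nil => simp [endfixW]
  | cons w rest ih => simp only [endfixW]; split <;> simp_all

lemma endfixW_ne_nil (t f : List Char) {rest : List (List Char)} (h : rest ≠ []) :
    endfixW t f rest ≠ [] := by
  intro hc
  have hl := endfixW_length t f rest
  rw [hc] at hl
  exact h (List.length_eq_zero_iff.mp hl.symm)

lemma goPE_eq_endfix_goP (t f : List Char) : ∀ ws b, goPE t f b ws = endfixW t f (goP t f b ws) := by
  intro ws
  induction ws with
  | nil => simp [goPE, goP, endfixW]
  | cons w rest ih =>
    intro b
    by_cases hr : rest = []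
    · subst hr; simp [goPE, goP, endfixW]
    · by_cases hc : w = t ∧ b = false
      · have h1 : w = t ∧ rest ≠ [] ∧ b = false := ⟨hc.1, hr, hc.2⟩
        rw [goPE, if_neg hr, if_pos hc, goP, if_pos h1, ih,
          endfixW, if_neg (goP_ne_nil t f true hr)]
      · have hc' : ¬(w = t ∧ rest ≠ [] ∧ b = false) := by
          intro ⟨h1, _, h3⟩; exact hc ⟨h1, h3⟩
        rw [goPE, if_neg hr, if_neg hc, goP, if_neg hc', ih,
          endfixW, if_neg (goP_ne_nil t f false hr)]

lemma goP_spfree (t f : List Char) (hf : ' ' ∉ f) :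
    ∀ b ws, (∀ w ∈ ws, ' ' ∉ w) → ∀ w ∈ goP t f b ws, ' ' ∉ w := by
  intro b ws
  induction ws generalizing b with
  | nil => simp [goP]
  | cons w rest ih =>
    intro h w' hw'
    simp only [goP] at hw'
    split at hw' <;> rcases List.mem_cons.mp hw' with h1 | h1
    · exact h1 ▸ hf
    · exact ih _ (fun x hx => h x (List.mem_cons_of_mem _ hx)) _ h1
    · exact h1 ▸ h w List.mem_cons_self
    · exact ih _ (fun x hx => h x (List.mem_cons_of_mem _ hx)) _ h1

-- ---- characterizing PySem.Chars.replace ----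

lemma replace_go_eq (p0 : Char) (ps rep : List Char) :
    ∀ (fuel : Nat) (l acc : List Char), l.length ≤ fuel →
      PySem.Chars.replace.go (p0 :: ps) rep fuel l acc = acc.reverse ++ repC p0 ps rep l := by
  intro fuel
  induction fuel with
  | zero =>
    intro l acc h
    have hl : l = [] := by cases l <;> simp_all
    subst hl
    simp [PySem.Chars.replace.go, repC]
  | succ n ih =>
    intro l acc h
    cases l with
    | nil => simp [PySem.Chars.replace.go, repC]
    | cons c tl =>
      rw [PySem.Chars.replace.go]
      by_cases hp : (p0 :: ps).isPrefixOf (c :: tl) = true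
      · rw [if_pos hp]
        have hlen : (List.drop (p0 :: ps).length (c :: tl)).length ≤ n := by
          simp at h ⊢; omega
        rw [ih _ _ hlen, repC, if_pos hp]
        simp
      · rw [if_neg hp, ih _ _ (by simp at h ⊢; omega), repC, if_neg hp]
        simp

lemma replace_eq_repC (p0 : Char) (ps rep s : List Char) :
    PySem.Chars.replace s (p0 :: ps) rep = repC p0 ps rep s := by
  rw [PySem.Chars.replace, if_neg (by simp)]
  simpa using replace_go_eq p0 ps rep s.length s [] le_rfl

lemma repC_skip (ps rep : List Char) : ∀ (w l : List Char), ' ' ∉ w →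
    repC ' ' ps rep (w ++ l) = w ++ repC ' ' ps rep l := by
  intro w
  induction w with
  | nil => simp
  | cons c w' ih =>
    intro l hw
    have hc : c ≠ ' ' := by
      intro h; exact hw (h ▸ List.mem_cons_self)
    have hp : ¬((' ' :: ps).isPrefixOf (c :: (w' ++ l)) = true) := by
      simp [List.isPrefixOf]
      intro h; exact (hc h.symm).elim
    rw [List.cons_append, repC, if_neg hp, ih l (fun h => hw (List.mem_cons_of_mem _ h))]
    simp

lemma prefix_words :
    ∀ (w t : List Char) (rest : List (List Char)), ' ' ∉ t → ' ' ∉ w →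
      ((t ++ [' ']) <+: (w ++ tailStr rest) ↔ (w = t ∧ rest ≠ [])) := by
  intro w
  induction w with
  | nil =>
    intro t rest ht _
    cases t with
    | nil =>
      cases rest with
      | nil => simp [tailStr]
      | cons r rs => simp [tailStr, List.cons_prefix_cons]
    | cons c t' =>
      have hc : c ≠ ' ' := fun h => ht (h ▸ List.mem_cons_self)
      cases rest with
      | nil => simp [tailStr]
      | cons r rs =>
        simp only [tailStr, List.flatMap_cons, List.nil_append, List.cons_append,
          List.cons_prefix_cons]
        simp only [ne_eq, reduceCtorEq, not_false_eq_true, and_true, iff_false, not_and]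
        exact fun h => (hc h).elim
  | cons a w' ih =>
    intro t rest ht hw
    have ha : a ≠ ' ' := fun h => hw (h ▸ List.mem_cons_self)
    cases t with
    | nil =>
      simp only [List.nil_append, List.cons_append, List.cons_prefix_cons]
      simp [Ne.symm ha]
    | cons c t' =>
      have ht' : ' ' ∉ t' := fun h => ht (List.mem_cons_of_mem _ h)
      have hw' : ' ' ∉ w' := fun h => hw (List.mem_cons_of_mem _ h)
      simp only [List.cons_append, List.cons_prefix_cons]
      rw [ih t' rest ht' hw']
      constructor
      · rintro ⟨rfl, rfl, h2⟩; exact ⟨rfl, h2⟩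
      · rintro ⟨h1, h2⟩
        obtain ⟨rfl, rfl⟩ : a = c ∧ w' = t' := by
          constructor <;> [exact (List.cons_eq_cons.mp h1).1; exact (List.cons_eq_cons.mp h1).2]
        exact ⟨rfl, rfl, h2⟩

def joinT : List (List Char) → List Char
  | [] => []
  | w :: rest => w ++ tailStr rest

lemma cons_joinT (X : List (List Char)) (h : X ≠ []) : ' ' :: joinT X = tailStr X := by
  cases X with
  | nil => exact absurd rfl h
  | cons v vs => simp [joinT, tailStr]

lemma repC_words (t f : List Char) (ht : ' ' ∉ t) (_hf : ' ' ∉ f) :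
    ∀ ws : List (List Char), (∀ w ∈ ws, ' ' ∉ w) →
      (repC ' ' (t ++ [' ']) (' ' :: (f ++ [' '])) (tailStr ws) = tailStr (goP t f false ws))
      ∧ (ws ≠ [] → repC ' ' (t ++ [' ']) (' ' :: (f ++ [' '])) (joinT ws) = joinT (goP t f true ws)) := by
  intro ws
  induction ws with
  | nil => intro _; exact ⟨by simp [tailStr, goP, repC], by simp⟩
  | cons w rest ih =>
    intro h
    have hw : ' ' ∉ w := h w List.mem_cons_self
    have hrest : ∀ x ∈ rest, ' ' ∉ x := fun x hx => h x (List.mem_cons_of_mem _ hx)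
    have ih' := ih hrest
    have htail : tailStr (w :: rest) = ' ' :: (w ++ tailStr rest) := by simp [tailStr]
    have hpre : ((' ' :: (t ++ [' '])).isPrefixOf (' ' :: (w ++ tailStr rest)) = true)
        ↔ (w = t ∧ rest ≠ []) := by
      rw [List.isPrefixOf_iff_prefix, List.cons_prefix_cons]
      simp [prefix_words w t rest ht hw]
    constructor
    · rw [htail, repC]
      by_cases hm : w = t ∧ rest ≠ []
      · rw [if_pos (hpre.mpr hm)]
        obtain ⟨rfl, hne⟩ := hm
        obtain ⟨r, rs, rfl⟩ := List.exists_cons_of_ne_nil hne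
        have hdrop : (w ++ tailStr (r :: rs)).drop (w ++ [' ']).length = r ++ tailStr rs := by
          rw [show w ++ tailStr (r :: rs) = (w ++ [' ']) ++ (r ++ tailStr rs) by
            simp [tailStr], List.drop_left]
        rw [hdrop, show r ++ tailStr rs = joinT (r :: rs) from rfl, ih'.2 (List.cons_ne_nil r rs)]
        rw [show goP w f false (w :: r :: rs) = f :: goP w f true (r :: rs) from by
          rw [goP, if_pos ⟨rfl, List.cons_ne_nil r rs, rfl⟩]]
        rw [show tailStr (f :: goP w f true (r :: rs))
            = ' ' :: (f ++ tailStr (goP w f true (r :: rs))) by simp [tailStr]]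
        rw [← cons_joinT _ (goP_ne_nil w f true (List.cons_ne_nil r rs))]
        simp
      · rw [if_neg (fun hcond => hm (hpre.mp hcond))]
        rw [repC_skip _ _ w _ hw, ih'.1]
        rw [goP, if_neg (by rintro ⟨h1, h2, _⟩; exact hm ⟨h1, h2⟩)]
        simp [tailStr]
    · intro _
      rw [show joinT (w :: rest) = w ++ tailStr rest from rfl,
        repC_skip _ _ w _ hw, ih'.1]
      rw [goP, if_neg (by simp)]
      rfl

lemma replace_words (t f : List Char) (ht : ' ' ∉ t) (hf : ' ' ∉ f)
    (w0 : List Char) (rest : List (List Char)) (hw0 : ' ' ∉ w0) (hrest : ∀ w ∈ rest, ' ' ∉ w) :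
    PySem.Chars.replace (w0 ++ tailStr rest) (' ' :: (t ++ [' '])) (' ' :: (f ++ [' ']))
      = w0 ++ tailStr (goP t f false rest) := by
  rw [replace_eq_repC, repC_skip _ _ w0 _ hw0, (repC_words t f ht hf rest hrest).1]

-- ---- characterizing splitOn ----

lemma splitOn_go_eq : ∀ (fuel : Nat) (l cur : List Char) (acc : List (List Char)),
    l.length ≤ fuel →
      PySem.Chars.splitOn.go [' '] fuel l cur acc
        = acc.reverse ++ ((cur.reverse ++ (splW l).1) :: (splW l).2) := by
  intro fuel
  induction fuel with
  | zero =>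
    intro l cur acc h
    have hl : l = [] := by cases l <;> simp_all
    subst hl
    simp [PySem.Chars.splitOn.go, splW]
  | succ n ih =>
    intro l cur acc h
    cases l with
    | nil => simp [PySem.Chars.splitOn.go, splW]
    | cons c tl =>
      rw [PySem.Chars.splitOn.go]
      by_cases hc : c = ' '
      · have hp : [' '].isPrefixOf (c :: tl) = true := by simp [List.isPrefixOf, hc]
        rw [if_pos hp, ih _ _ _ (by simp at h ⊢; omega)]
        subst hc
        simp [splW, List.drop]
      · have hp : ¬([' '].isPrefixOf (c :: tl) = true) := by
          simp [List.isPrefixOf]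
          exact fun h' => hc h'.symm
        rw [if_neg hp, ih _ _ _ (by simp at h ⊢; omega)]
        simp [splW, hc]

lemma splitOn_eq (cs : List Char) :
    PySem.Chars.splitOn cs [' '] = (splW cs).1 :: (splW cs).2 := by
  rw [PySem.Chars.splitOn]
  simpa using splitOn_go_eq (cs.length + 1) cs [] [] (by omega)

lemma splW_join (cs : List Char) : (splW cs).1 ++ tailStr (splW cs).2 = cs := by
  induction cs with
  | nil => simp [splW, tailStr]
  | cons c tl ih =>
    by_cases hc : c = ' '
    · subst hc; simp only [splW, tailStr]
      simpa [tailStr] using ih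
    · simp [splW, hc, ih]

lemma splW_spfree (cs : List Char) :
    ' ' ∉ (splW cs).1 ∧ ∀ w ∈ (splW cs).2, ' ' ∉ w := by
  induction cs with
  | nil => simp [splW]
  | cons c tl ih =>
    by_cases hc : c = ' '
    · subst hc
      refine ⟨by simp [splW], ?_⟩
      intro w hw
      simp only [splW] at hw
      rcases List.mem_cons.mp hw with rfl | hw
      · exact ih.1
      · exact ih.2 _ hw
    · refine ⟨?_, ?_⟩
      · simp only [splW, if_neg hc]
        intro hmem
        rcases List.mem_cons.mp hmem with h | h
        · exact hc h.symm
        · exact ih.1 h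
      · intro w hw
        simp only [splW, if_neg hc] at hw
        exact ih.2 _ hw

-- ---- characterizing the endswith fix ----

lemma endswith_nil_words (t w0 : List Char) (hw0 : ' ' ∉ w0) :
    PySem.Chars.endswith w0 (' ' :: t) = false := by
  have h : ¬((' ' :: t) <:+ w0) := fun h => hw0 (h.subset List.mem_cons_self)
  simp only [PySem.Chars.endswith, Bool.eq_false_iff, ne_eq, List.isSuffixOf_iff_suffix]
  exact h

lemma endswith_single (t w0 w : List Char) (ht : ' ' ∉ t) (hw : ' ' ∉ w) :
    (PySem.Chars.endswith (w0 ++ ' ' :: w) (' ' :: t) = true) ↔ w = t := by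
  rw [PySem.Chars.endswith, List.isSuffixOf_iff_suffix, ← List.reverse_prefix]
  rw [show (' ' :: t).reverse = t.reverse ++ [' '] by simp]
  rw [show (w0 ++ ' ' :: w).reverse = w.reverse ++ tailStr [w0.reverse] by
    simp [tailStr]]
  rw [prefix_words w.reverse t.reverse [w0.reverse]
    (by simpa using ht) (by simpa using hw)]
  simp

lemma endstep_aux (t f : List Char) (ht : ' ' ∉ t) :
    ∀ (rest : List (List Char)) (w0 : List Char), rest ≠ [] → (∀ w ∈ rest, ' ' ∉ w) →
      (if PySem.Chars.endswith (w0 ++ tailStr rest) (' ' :: t)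
       then PySem.List.slice (w0 ++ tailStr rest) none (some (-((t.length + 1 : Nat) : Int))) ++ (' ' :: f)
       else w0 ++ tailStr rest)
      = w0 ++ tailStr (endfixW t f rest) := by
  intro rest
  induction rest with
  | nil => intro w0 h; exact absurd rfl h
  | cons w rest' ih =>
    intro w0 _ hcl
    have hw : ' ' ∉ w := hcl w List.mem_cons_self
    by_cases hr : rest' = []
    · subst hr
      have htl : tailStr [w] = ' ' :: w := by simp [tailStr]
      rw [htl]
      by_cases hwt : w = t
      · rw [if_pos ((endswith_single t w0 w ht hw).mpr hwt)]
        rw [PySem.List.slice_to_neg_natCast (w0 ++ ' ' :: w) (t.length + 1) (by omega)]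
        have hlen : (w0 ++ ' ' :: w).length - (t.length + 1) = w0.length := by
          subst hwt; simp
        rw [hlen, List.take_left]
        simp [endfixW, hwt, tailStr]
      · rw [if_neg (fun hc => hwt ((endswith_single t w0 w ht hw).mp hc))]
        simp [endfixW, hwt, tailStr]
    · have hassoc : w0 ++ tailStr (w :: rest') = (w0 ++ ' ' :: w) ++ tailStr rest' := by
        simp [tailStr]
      rw [hassoc, ih (w0 ++ ' ' :: w) hr (fun x hx => hcl x (List.mem_cons_of_mem _ hx))]
      rw [show endfixW t f (w :: rest') = w :: endfixW t f rest' from by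
        rw [endfixW, if_neg hr]]
      simp [tailStr]

lemma endstep_words (t f : List Char) (ht : ' ' ∉ t) :
    ∀ (rest : List (List Char)) (w0 : List Char), ' ' ∉ w0 → (∀ w ∈ rest, ' ' ∉ w) →
      (if PySem.Chars.endswith (w0 ++ tailStr rest) (' ' :: t)
       then PySem.List.slice (w0 ++ tailStr rest) none (some (-((t.length + 1 : Nat) : Int))) ++ (' ' :: f)
       else w0 ++ tailStr rest)
      = w0 ++ tailStr (endfixW t f rest) := by
  intro rest w0 hw0 hcl
  cases hr : rest with
  | nil =>
    simp only [tailStr, List.flatMap_nil, List.append_nil]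
    rw [if_neg (by simp [endswith_nil_words t w0 hw0])]
    simp [endfixW]
  | cons w rest' => exact endstep_aux t f ht (w :: rest') w0 (by simp) (hr ▸ hcl)

-- ---- the two folds of A, bridged to word level ----

lemma fold1_bridge : ∀ (TSs : List (String × String)) (TSc : List (List Char × List Char)),
    TSs.map (fun p => (p.1.toList, p.2.toList)) = TSc.map (fun p => (' ' :: p.1, ' ' :: p.2)) →
    (∀ p ∈ TSc, ' ' ∉ p.1 ∧ ' ' ∉ p.2) →
    ∀ (s : String) (w0 : List Char) (rest : List (List Char)),
      s.toList = w0 ++ tailStr rest → ' ' ∉ w0 → (∀ w ∈ rest, ' ' ∉ w) →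
      (TSs.foldl (fun s p => PySem.Str.replace s (p.1 ++ " ") (p.2 ++ " ")) s).toList
        = w0 ++ tailStr (TSc.foldl (fun ws p => goP p.1 p.2 false ws) rest) := by
  intro TSs
  induction TSs with
  | nil =>
    intro TSc hrel _ s w0 rest hs _ _
    cases TSc with
    | nil => simpa using hs
    | cons _ _ => simp at hrel
  | cons ps TSs ih =>
    intro TSc hrel hcl s w0 rest hs hw0 hrest
    cases TSc with
    | nil => simp at hrel
    | cons pc TSc =>
      simp only [List.map_cons, List.cons.injEq, Prod.mk.injEq] at hrel
      obtain ⟨⟨h1, h2⟩, hrel'⟩ := hrel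
      have hc1 : ' ' ∉ pc.1 := (hcl pc List.mem_cons_self).1
      have hc2 : ' ' ∉ pc.2 := (hcl pc List.mem_cons_self).2
      simp only [List.foldl_cons]
      refine ih TSc hrel' (fun p hp => hcl p (List.mem_cons_of_mem _ hp)) _ w0
        (goP pc.1 pc.2 false rest) ?_ hw0 (goP_spfree pc.1 pc.2 hc2 false rest hrest)
      rw [PySem.Str.toList_replace]
      rw [show (ps.1 ++ " ").toList = ' ' :: (pc.1 ++ [' ']) by
        rw [String.toList_append, h1]; rfl]
      rw [show (ps.2 ++ " ").toList = ' ' :: (pc.2 ++ [' ']) by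
        rw [String.toList_append, h2]; rfl]
      rw [hs, replace_words pc.1 pc.2 hc1 hc2 w0 rest hw0 hrest]

lemma foldl_goP_spfree : ∀ (TS : List (List Char × List Char)) (ws : List (List Char)),
    (∀ p ∈ TS, ' ' ∉ p.2) → (∀ w ∈ ws, ' ' ∉ w) →
    ∀ w ∈ TS.foldl (fun ws p => goP p.1 p.2 false ws) ws, ' ' ∉ w := by
  intro TS
  induction TS with
  | nil => intro ws _ h; simpa using h
  | cons p TS ih =>
    intro ws hTS hws
    simp only [List.foldl_cons]
    exact ih _ (fun q hq => hTS q (List.mem_cons_of_mem _ hq))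
      (goP_spfree p.1 p.2 (hTS p List.mem_cons_self) false ws hws)

lemma endfixW_spfree (t f : List Char) (hf : ' ' ∉ f) :
    ∀ ws, (∀ w ∈ ws, ' ' ∉ w) → ∀ w ∈ endfixW t f ws, ' ' ∉ w := by
  intro ws
  induction ws with
  | nil => simp [endfixW]
  | cons w rest ih =>
    intro h w' hw'
    simp only [endfixW] at hw'
    split at hw'
    · rcases List.mem_singleton.mp hw' with rfl
      split
      · exact hf
      · exact h w List.mem_cons_self
    · rcases List.mem_cons.mp hw' with h1 | h1
      · exact h1 ▸ h w List.mem_cons_self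
      · exact ih (fun x hx => h x (List.mem_cons_of_mem _ hx)) _ h1

lemma fold2_bridge : ∀ (TSs : List (String × String)) (TSc : List (List Char × List Char)),
    TSs.map (fun p => (p.1.toList, p.2.toList)) = TSc.map (fun p => (' ' :: p.1, ' ' :: p.2)) →
    (∀ p ∈ TSc, ' ' ∉ p.1 ∧ ' ' ∉ p.2) →
    ∀ (s : String) (w0 : List Char) (rest : List (List Char)),
      s.toList = w0 ++ tailStr rest → ' ' ∉ w0 → (∀ w ∈ rest, ' ' ∉ w) →
      (TSs.foldl (fun s p =>
          if PySem.Str.endswith s p.1 then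
            PySem.Str.slice s none (some (-(PySem.Str.len p.1))) ++ p.2
          else s) s).toList
        = w0 ++ tailStr (TSc.foldl (fun ws p => endfixW p.1 p.2 ws) rest) := by
  intro TSs
  induction TSs with
  | nil =>
    intro TSc hrel _ s w0 rest hs _ _
    cases TSc with
    | nil => simpa using hs
    | cons _ _ => simp at hrel
  | cons ps TSs ih =>
    intro TSc hrel hcl s w0 rest hs hw0 hrest
    cases TSc with
    | nil => simp at hrel
    | cons pc TSc =>
      simp only [List.map_cons, List.cons.injEq, Prod.mk.injEq] at hrel
      obtain ⟨⟨h1, h2⟩, hrel'⟩ := hrel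
      have hc1 : ' ' ∉ pc.1 := (hcl pc List.mem_cons_self).1
      have hc2 : ' ' ∉ pc.2 := (hcl pc List.mem_cons_self).2
      have hstep := endstep_words pc.1 pc.2 hc1 rest w0 hw0 hrest
      have hcond : PySem.Str.endswith s ps.1 = PySem.Chars.endswith (w0 ++ tailStr rest) (' ' :: pc.1) := by
        rw [show PySem.Str.endswith s ps.1
            = PySem.Chars.endswith s.toList ps.1.toList from rfl, hs, h1]
      have hlen : PySem.Str.len ps.1 = ((pc.1.length + 1 : Nat) : Int) := by
        rw [PySem.Str.len_eq, h1]; simp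
      simp only [List.foldl_cons]
      refine ih TSc hrel' (fun p hp => hcl p (List.mem_cons_of_mem _ hp)) _ w0
        (endfixW pc.1 pc.2 rest) ?_ hw0 ?_
      · by_cases hb : PySem.Chars.endswith (w0 ++ tailStr rest) (' ' :: pc.1) = true
        · rw [if_pos (by rw [hcond]; exact hb)]
          rw [if_pos hb] at hstep
          rw [String.toList_append, PySem.Str.toList_slice, hs, h2, hlen]
          rw [show PySem.Chars.slice (w0 ++ tailStr rest) none (some (-((pc.1.length + 1 : Nat) : Int)))
              = PySem.List.slice (w0 ++ tailStr rest) none (some (-((pc.1.length + 1 : Nat) : Int))) from rfl]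
          rw [show (' ' :: pc.2 : List Char) = [' '] ++ pc.2 from rfl] at hstep
          rw [← hstep]
          simp
        · rw [if_neg (by rw [hcond]; exact hb)]
          rw [if_neg hb] at hstep
          rw [hs, hstep]
      · exact endfixW_spfree pc.1 pc.2 hc2 rest hrest

-- ---- goPE: fold of the two phases, and its behaviour off D_ ----

lemma comm_endfix_goP (t f u g : List Char) :
    ∀ (b : Bool) (ws : List (List Char)),
      endfixW t f (goP u g b ws) = goP u g b (endfixW t f ws) := by
  intro b ws
  induction ws generalizing b with
  | nil => simp [goP, endfixW]
  | cons w rest ih =>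
    by_cases hr : rest = []
    · subst hr; simp [goP, endfixW]
    · have her : endfixW t f rest ≠ [] := endfixW_ne_nil t f hr
      by_cases hc : w = u ∧ b = false
      · have h1 : w = u ∧ rest ≠ [] ∧ b = false := ⟨hc.1, hr, hc.2⟩
        have h2 : w = u ∧ endfixW t f rest ≠ [] ∧ b = false := ⟨hc.1, her, hc.2⟩
        rw [goP, if_pos h1, endfixW, if_neg (goP_ne_nil u g true hr),
          endfixW, if_neg hr, goP, if_pos h2, ih]
      · have h1 : ¬(w = u ∧ rest ≠ [] ∧ b = false) := fun ⟨a1, _, a3⟩ => hc ⟨a1, a3⟩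
        have h2 : ¬(w = u ∧ endfixW t f rest ≠ [] ∧ b = false) := fun ⟨a1, _, a3⟩ => hc ⟨a1, a3⟩
        rw [goP, if_neg h1, endfixW, if_neg (goP_ne_nil u g false hr),
          endfixW, if_neg hr, goP, if_neg h2, ih]

lemma comm_endfix_repAll (t f : List Char) (TS : List (List Char × List Char)) :
    ∀ ws : List (List Char),
      endfixW t f (TS.foldl (fun s p => goP p.1 p.2 false s) ws)
        = TS.foldl (fun s p => goP p.1 p.2 false s) (endfixW t f ws) := by
  induction TS with
  | nil => intro ws; simp
  | cons p TS ih =>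
    intro ws
    simp only [List.foldl_cons]
    rw [ih, comm_endfix_goP]

-- A's two phases over the key list collapse to one goPE pass per key
lemma folds_to_goPE : ∀ (TS : List (List Char × List Char)) (ws : List (List Char)),
    TS.foldl (fun s p => endfixW p.1 p.2 s) (TS.foldl (fun s p => goP p.1 p.2 false s) ws)
      = TS.foldl (fun s p => goPE p.1 p.2 false s) ws := by
  intro TS
  induction TS with
  | nil => intro ws; simp
  | cons p TS ih =>
    intro ws
    simp only [List.foldl_cons]
    rw [show endfixW p.1 p.2 (TS.foldl (fun s q => goP q.1 q.2 false s) (goP p.1 p.2 false ws))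
        = TS.foldl (fun s q => goP q.1 q.2 false s) (endfixW p.1 p.2 (goP p.1 p.2 false ws)) from
      comm_endfix_repAll p.1 p.2 TS _]
    rw [← goPE_eq_endfix_goP, ih]

-- proof-side word-level pattern behind D_: adjacent equal abbreviation words, not at the very end
def pvPatAll : List (List Char) → Bool
  | a :: b :: c :: r =>
    (a == b && ["N", "E", "S", "W", "Rd", "St", "Av", "Blvd", "Dr"].contains (String.ofList a))
      || pvPatAll (b :: c :: r)
  | _ => false

-- a word-level pattern yields the doubled-abbreviation substring " t t "
def pvIsAbbrev (w : List Char) : Bool :=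
  ["N", "E", "S", "W", "Rd", "St", "Av", "Blvd", "Dr"].contains (String.ofList w)

lemma pvPatAll_cons (a b c : List Char) (r : List (List Char)) :
    pvPatAll (a :: b :: c :: r) = ((a == b && pvIsAbbrev a) || pvPatAll (b :: c :: r)) := rfl

lemma patAll_infix : ∀ ws : List (List Char), pvPatAll ws = true →
    ∃ t, pvIsAbbrev t = true ∧ (' ' :: (t ++ ' ' :: (t ++ [' ']))) <:+: tailStr ws := by
  intro ws
  induction ws with
  | nil => intro h; cases h
  | cons a tl ih =>
    intro h
    cases tl with
    | nil => cases h
    | cons b tl2 =>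
      cases tl2 with
      | nil => cases h
      | cons c r =>
        rw [pvPatAll, Bool.or_eq_true, Bool.and_eq_true] at h
        rcases h with ⟨hab, hk⟩ | h
        · have hab' : a = b := by simpa using hab
          refine ⟨a, hk, [], c ++ tailStr r, ?_⟩
          subst hab'
          simp [tailStr]
        · obtain ⟨t, hk, hinf⟩ := ih h
          refine ⟨t, hk, hinf.trans ?_⟩
          have he : tailStr (a :: b :: c :: r) = (' ' :: a) ++ tailStr (b :: c :: r) := by
            simp [tailStr]
          rw [he]
          exact (List.suffix_append _ _).isInfix

-- proof-side view of the inline abbreviation test of pvPatAll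
-- per-key pattern "t t followed by something"
def patK (t : List Char) : List (List Char) → Bool
  | a :: b :: c :: r => (a == t && b == t) || patK t (b :: c :: r)
  | _ => false

lemma patK_of_patAll_false : ∀ (ws : List (List Char)) (t : List Char),
    pvPatAll ws = false → pvIsAbbrev t = true → patK t ws = false := by
  intro ws
  induction ws with
  | nil => intro t _ _; rfl
  | cons a tl ih =>
    intro t h ht
    cases tl with
    | nil => rfl
    | cons b tl2 =>
      cases tl2 with
      | nil => rfl
      | cons c r =>
        rw [pvPatAll_cons] at h
        rw [patK]
        simp only [Bool.or_eq_false_iff, Bool.and_eq_false_iff, beq_eq_false_iff_ne, ne_eq] at h ⊢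
        refine ⟨?_, ih t h.2 ht⟩
        by_cases hat : a = t
        · by_cases hbt : b = t
          · exfalso
            rcases h.1 with h1 | h1
            · exact h1 (hat.trans hbt.symm)
            · rw [hat, ht] at h1
              cases h1
          · exact Or.inr hbt
        · exact Or.inl hat

lemma patK_tail (t : List Char) (a : List Char) (tl : List (List Char)) :
    patK t (a :: tl) = false → patK t tl = false := by
  intro h
  cases tl with
  | nil => rfl
  | cons b tl2 =>
    cases tl2 with
    | nil => rfl
    | cons c r =>
      rw [patK] at h
      exact (Bool.or_eq_false_iff.mp h).2

lemma goPE_flag_irrel (t f w : List Char) (rest : List (List Char)) (h : w ≠ t ∨ rest = []) :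
    goPE t f true (w :: rest) = goPE t f false (w :: rest) := by
  rcases h with h | h
  · by_cases hr : rest = []
    · subst hr; rfl
    · rw [goPE, goPE, if_neg hr, if_neg hr, if_neg (by simp [h]), if_neg (by simp [h])]
  · subst h; rfl

lemma goPE_noPat (t f : List Char) : ∀ ws, patK t ws = false →
    goPE t f false ws = ws.map (fun w => if w = t then f else w) := by
  intro ws
  induction ws with
  | nil => intro _; rfl
  | cons w rest ih =>
    intro h
    by_cases hr : rest = []
    · subst hr; rfl
    · by_cases hwt : w = t
      · rw [goPE, if_neg hr, if_pos ⟨hwt, rfl⟩]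
        obtain ⟨r, v, rfl⟩ := List.exists_cons_of_ne_nil hr
        cases v with
        | nil =>
          rw [show goPE t f true [r] = [if r = t then f else r] from rfl]
          simp [hwt]
        | cons c v' =>
          have hrt : r ≠ t := by
            intro hc
            rw [patK, hwt, hc] at h
            simp at h
          rw [goPE_flag_irrel t f r (c :: v') (Or.inl hrt), ih (patK_tail t _ _ h)]
          simp [hwt]
      · rw [goPE, if_neg hr, if_neg (by simp [hwt]), ih (patK_tail t _ _ h)]
        simp [hwt]

lemma patAll_subst (t f : List Char) (hf : pvIsAbbrev f = false) : ∀ ws,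
    pvPatAll ws = false →
    pvPatAll (ws.map (fun w => if w = t then f else w)) = false := by
  intro ws
  induction ws with
  | nil => intro _; rfl
  | cons a tl ih =>
    intro h
    cases tl with
    | nil => rfl
    | cons b tl2 =>
      cases tl2 with
      | nil => rfl
      | cons c r =>
        rw [pvPatAll_cons] at h
        simp only [List.map_cons]
        rw [pvPatAll_cons]
        simp only [Bool.or_eq_false_iff, Bool.and_eq_false_iff, beq_eq_false_iff_ne, ne_eq] at h ⊢
        refine ⟨?_, ih h.2⟩
        by_cases hk : pvIsAbbrev (if a = t then f else a) = true
        · have hga : (if a = t then f else a) = a := by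
            by_cases hat : a = t
            · exfalso
              rw [if_pos hat, hf] at hk
              cases hk
            · rw [if_neg hat]
          left
          intro heq
          rw [hga] at heq hk
          have hb : (if b = t then f else b) = b := by
            by_cases hbt : b = t
            · exfalso
              rw [if_pos hbt] at heq
              rw [heq, hf] at hk
              cases hk
            · rw [if_neg hbt]
          rw [hb] at heq
          rcases h.1 with h1 | h1
          · exact h1 heq
          · rw [h1] at hk
            cases hk
        · exact Or.inr (by simpa using hk)

lemma fold_goPE_map : ∀ (TS : List (List Char × List Char)),
    (∀ p ∈ TS, pvIsAbbrev p.1 = true) → (∀ p ∈ TS, pvIsAbbrev p.2 = false) → ∀ ws, pvPatAll ws = false →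
    TS.foldl (fun s p => goPE p.1 p.2 false s) ws
      = ws.map (fun w => TS.foldl (fun w p => if w = p.1 then p.2 else w) w) := by
  intro TS
  induction TS with
  | nil => intro _ _ ws _; simp
  | cons p TS ih =>
    intro hkey hval ws hpa
    simp only [List.foldl_cons]
    rw [goPE_noPat p.1 p.2 ws
      (patK_of_patAll_false ws p.1 hpa (hkey p List.mem_cons_self))]
    have hpa' : pvPatAll (ws.map (fun w => if w = p.1 then p.2 else w)) = false :=
      patAll_subst p.1 p.2 (hval p List.mem_cons_self) ws hpa
    rw [ih (fun q hq => hkey q (List.mem_cons_of_mem _ hq))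
      (fun q hq => hval q (List.mem_cons_of_mem _ hq)) _ hpa']
    rw [List.map_map]
    rfl

lemma foldl_subst_stay : ∀ (TS : List (List Char × List Char)) (w : List Char),
    (∀ q ∈ TS, w ≠ q.1) →
    TS.foldl (fun w p => if w = p.1 then p.2 else w) w = w := by
  intro TS
  induction TS with
  | nil => intro w _; rfl
  | cons p TS ih =>
    intro w h
    simp only [List.foldl_cons]
    rw [if_neg (h p List.mem_cons_self), ih w (fun q hq => h q (List.mem_cons_of_mem _ hq))]

lemma foldl_subst_eq_find : ∀ (TS : List (List Char × List Char)),
    (∀ p ∈ TS, ∀ q ∈ TS, p.2 ≠ q.1) → ∀ w,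
    TS.foldl (fun w p => if w = p.1 then p.2 else w) w
      = (match TS.find? (fun p => p.1 == w) with | some p => p.2 | none => w) := by
  intro TS
  induction TS with
  | nil => intro _ w; rfl
  | cons p TS ih =>
    intro h w
    simp only [List.foldl_cons]
    by_cases hw : w = p.1
    · rw [if_pos hw]
      rw [foldl_subst_stay TS p.2 (fun q hq =>
        h p List.mem_cons_self q (List.mem_cons_of_mem _ hq))]
      rw [List.find?_cons_of_pos (by simp [hw])]
    · rw [if_neg hw, ih (fun a ha b hb =>
        h a (List.mem_cons_of_mem _ ha) b (List.mem_cons_of_mem _ hb)) w]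
      rw [List.find?_cons_of_neg (by simp; exact fun hc => hw hc.symm)]

lemma join_words (w0 : List Char) (vs : List (List Char)) :
    PySem.Chars.join [' '] (w0 :: vs) = w0 ++ tailStr vs := by
  induction vs generalizing w0 with
  | nil => simp [PySem.Chars.join_singleton, tailStr]
  | cons v vs ih =>
    rw [PySem.Chars.join_cons_cons, ih]
    simp [tailStr]


-- ---- tightness: inside D_ the two ports really differ ----

lemma bor_true {a b : Bool} (h : (a || b) = true) : a = true ∨ b = true := by simpa using h

lemma band_true {a b : Bool} (h : (a && b) = true) : a = true ∧ b = true := by simpa using h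


lemma goPE_ne_nil (t f : List Char) (b : Bool) {rest : List (List Char)} (h : rest ≠ []) :
    goPE t f b rest ≠ [] := by
  rw [goPE_eq_endfix_goP]
  exact endfixW_ne_nil t f (goP_ne_nil t f b h)

-- patK survives prepending a word
lemma patK_cons (t x : List Char) (ws : List (List Char)) (h : patK t ws = true) :
    patK t (x :: ws) = true := by
  cases ws with
  | nil => cases h
  | cons b tl =>
    cases tl with
    | nil => cases h
    | cons c r =>
      rw [patK]
      simp [h]

lemma splW_word (w z : List Char) (hw : ' ' ∉ w) :
    splW (w ++ ' ' :: z) = (w, (splW z).1 :: (splW z).2) := by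
  induction w with
  | nil => simp [splW]
  | cons c w' ih =>
    have hc : c ≠ ' ' := fun h => hw (h ▸ List.mem_cons_self)
    simp [splW, hc, ih (fun h => hw (List.mem_cons_of_mem _ h))]

-- a doubled-abbreviation substring " t t " forces the word-level pattern
lemma infix_patK (t : List Char) (ht : ' ' ∉ t) :
    ∀ cs : List Char, (' ' :: (t ++ ' ' :: (t ++ [' ']))) <:+: cs →
      patK t ((splW cs).2) = true := by
  intro cs
  induction cs with
  | nil =>
    intro h
    simp at h
  | cons c tl ih =>
    intro h
    rcases List.infix_cons_iff.mp h with hpre | hinf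
    · obtain ⟨u, hu⟩ := hpre
      have hc : c = ' ' := (List.cons_eq_cons.mp hu).1.symm
      have htl : tl = t ++ ' ' :: (t ++ ' ' :: u) := by
        have := (List.cons_eq_cons.mp hu).2
        rw [← this]
        simp
      subst hc
      rw [show (splW (' ' :: tl)).2 = (splW tl).1 :: (splW tl).2 from by simp [splW]]
      rw [htl, splW_word t _ ht, splW_word t u ht]
      rw [patK]
      simp
    · by_cases hc : c = ' '
      · subst hc
        rw [show (splW (' ' :: tl)).2 = (splW tl).1 :: (splW tl).2 from by simp [splW]]
        exact patK_cons t _ _ (ih hinf)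
      · rw [show (splW (c :: tl)).2 = (splW tl).2 from by simp [splW, hc]]
        exact ih hinf

-- membership survives another key's pass
lemma goPE_mem (u g t : List Char) (hut : t ≠ u) :
    ∀ (b : Bool) (ws : List (List Char)), t ∈ ws → t ∈ goPE u g b ws := by
  intro b ws
  induction ws generalizing b with
  | nil => intro h; cases h
  | cons w rest ih =>
    intro hm
    by_cases hr : rest = []
    · subst hr
      rcases List.mem_singleton.mp hm with rfl
      rw [show goPE u g b [t] = [if t = u then g else t] from by cases b <;> rfl]
      simp [hut]
    · rw [goPE, if_neg hr]
      rcases List.mem_cons.mp hm with rfl | hmem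
      · rw [if_neg (fun hco => hut hco.1)]
        exact List.mem_cons_self
      · split
        · exact List.mem_cons_of_mem _ (ih true hmem)
        · exact List.mem_cons_of_mem _ (ih false hmem)

-- the pattern survives another key's pass
lemma goPE_patK (u g t : List Char) (hut : t ≠ u) (_hgt : g ≠ t) :
    ∀ (ws : List (List Char)) (b : Bool), patK t ws = true → patK t (goPE u g b ws) = true := by
  intro ws
  induction ws with
  | nil => intro b h; cases h
  | cons a tl ih =>
    intro b h
    cases tl with
    | nil => cases h
    | cons b2 tl2 =>
      cases tl2 with
      | nil => cases h
      | cons c r =>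
        rw [patK] at h
        by_cases hab : a = u ∧ b = false
        · have h' : patK t (b2 :: c :: r) = true := by
            rcases bor_true h with h1 | h1
            · exfalso
              have ha : a = t := by simpa using (band_true h1).1
              exact hut (ha ▸ hab.1.symm ▸ rfl)
            · exact h1
          rw [goPE, if_neg (by simp), if_pos hab]
          exact patK_cons t g _ (ih true h')
        · rw [goPE, if_neg (by simp), if_neg hab]
          rcases bor_true h with h1 | h1
          · have ha : a = t := by simpa using (band_true h1).1
            have hb2 : b2 = t := by simpa using (band_true h1).2
            have hstep : goPE u g false (b2 :: c :: r) = b2 :: goPE u g false (c :: r) := by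
              rw [goPE, if_neg (by simp), if_neg (by
                intro hco
                exact hut (hb2 ▸ hco.1.symm ▸ rfl))]
            rw [hstep]
            obtain ⟨x, xs, hxx⟩ :=
              List.exists_cons_of_ne_nil (goPE_ne_nil u g false (List.cons_ne_nil c r))
            rw [hxx, patK]
            simp [ha, hb2]
          · exact patK_cons t a _ (ih false h1)

-- the pattern's own pass leaves one occurrence unexpanded
lemma patK_skip (t f : List Char) :
    ∀ (ws : List (List Char)) (b : Bool), patK t ws = true → t ∈ goPE t f b ws := by
  intro ws
  induction ws with
  | nil => intro b h; cases h
  | cons w rest ih =>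
    intro b h
    cases rest with
    | nil => cases h
    | cons b2 tl2 =>
      cases tl2 with
      | nil => cases h
      | cons c r =>
        rw [patK] at h
        by_cases hwb : w = t ∧ b = false
        · rw [goPE, if_neg (by simp), if_pos hwb]
          by_cases hb2 : b2 = t
          · have hstep : goPE t f true (b2 :: c :: r) = b2 :: goPE t f false (c :: r) := by
              rw [goPE, if_neg (by simp), if_neg (by simp)]
            apply List.mem_cons_of_mem
            rw [hstep]
            exact hb2 ▸ List.mem_cons_self
          · have h' : patK t (b2 :: c :: r) = true := by
              rcases bor_true h with h1 | h1
              · exact absurd (by simpa using (band_true h1).2) hb2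
              · exact h1
            exact List.mem_cons_of_mem _ (ih true h')
        · rw [goPE, if_neg (by simp), if_neg hwb]
          by_cases hwt : w = t
          · exact hwt ▸ List.mem_cons_self
          · have h' : patK t (b2 :: c :: r) = true := by
              rcases bor_true h with h1 | h1
              · exact absurd (by simpa using (band_true h1).1) hwt
              · exact h1
            exact List.mem_cons_of_mem _ (ih false h')

-- reaching an unexpanded abbreviation through the whole fold
lemma fold_reach (t : List Char) : ∀ (TS : List (List Char × List Char)) (ws : List (List Char)),
    (∀ p ∈ TS, p.2 ≠ t) →
    ((TS.any (fun p => p.1 == t) = true ∧ (TS.map Prod.fst).Nodup ∧ patK t ws = true)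
      ∨ (TS.any (fun p => p.1 == t) = false ∧ t ∈ ws)) →
    t ∈ TS.foldl (fun s p => goPE p.1 p.2 false s) ws := by
  intro TS
  induction TS with
  | nil =>
    intro ws _ h
    rcases h with ⟨h1, _⟩ | ⟨_, h2⟩
    · cases h1
    · simpa using h2
  | cons p TS ih =>
    intro ws hfull h
    obtain ⟨u, g⟩ := p
    have hg : g ≠ t := hfull (u, g) List.mem_cons_self
    simp only [List.foldl_cons]
    rcases h with ⟨hany, hnd, hpat⟩ | ⟨hany, hmem⟩
    · by_cases hu : u = t
      · subst hu
        have hnotin : TS.any (fun p => p.1 == u) = false := by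
          rw [List.any_eq_false]
          intro q hq
          simp only [beq_iff_eq]
          exact fun hqu =>
            (List.nodup_cons.mp (by simpa using hnd)).1 (List.mem_map.mpr ⟨q, hq, hqu⟩)
        refine ih _ (fun q hq => hfull q (List.mem_cons_of_mem _ hq))
          (Or.inr ⟨hnotin, patK_skip u g ws false hpat⟩)
      · have hany' : TS.any (fun p => p.1 == t) = true := by
          rw [List.any_cons] at hany
          rcases bor_true hany with h1 | h1
          · exact absurd (by simpa using h1) hu
          · exact h1
        refine ih _ (fun q hq => hfull q (List.mem_cons_of_mem _ hq))
          (Or.inl ⟨hany', (List.nodup_cons.mp (by simpa using hnd)).2,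
            goPE_patK u g t (fun he => hu he.symm) hg ws false hpat⟩)
    · have hu : u ≠ t := by
        rw [List.any_cons] at hany
        simpa using (Bool.or_eq_false_iff.mp hany).1
      have hany' : TS.any (fun p => p.1 == t) = false := by
        rw [List.any_cons] at hany
        exact (Bool.or_eq_false_iff.mp hany).2
      exact ih _ (fun q hq => hfull q (List.mem_cons_of_mem _ hq))
        (Or.inr ⟨hany', goPE_mem u g t (fun he => hu he.symm) false ws hmem⟩)

-- B's words never keep a bare abbreviation
lemma lookup_not_abbrev : ∀ w, pvIsAbbrev (pvLookup w) = false := by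
  intro w
  unfold pvLookup
  cases hf : pvFull.find? (fun p => p.1 == w) with
  | some p =>
    have hp : p ∈ pvFull := List.mem_of_find?_eq_some hf
    exact (by decide : ∀ q ∈ pvFull, pvIsAbbrev q.2 = false) p hp
  | none =>
    by_contra hne
    have habb : pvIsAbbrev w = true := eq_true_of_ne_false hne
    simp only [pvIsAbbrev, List.contains_iff_mem, List.mem_cons, List.not_mem_nil,
      or_false] at habb
    rcases habb with h|h|h|h|h|h|h|h|h <;>
      rw [show w = (String.ofList w).toList from String.toList_ofList.symm, h] at hf <;>
      exact absurd hf (by decide)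

lemma pvLookup_spfree (x : List Char) (hx : ' ' ∉ x) : ' ' ∉ pvLookup x := by
  unfold pvLookup
  cases hf : pvFull.find? (fun p => p.1 == x) with
  | some p =>
    exact ((by decide : ∀ q ∈ pvFull, ' ' ∉ q.1 ∧ ' ' ∉ q.2) p
      (List.mem_of_find?_eq_some hf)).2
  | none => exact hx

lemma foldl_endfix_spfree : ∀ (TS : List (List Char × List Char)) (ws : List (List Char)),
    (∀ p ∈ TS, ' ' ∉ p.2) → (∀ w ∈ ws, ' ' ∉ w) →
    ∀ w ∈ TS.foldl (fun s p => endfixW p.1 p.2 s) ws, ' ' ∉ w := by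
  intro TS
  induction TS with
  | nil => intro ws _ h; simpa using h
  | cons p TS ih =>
    intro ws hTS hws
    simp only [List.foldl_cons]
    exact ih _ (fun q hq => hTS q (List.mem_cons_of_mem _ hq))
      (endfixW_spfree p.1 p.2 (hTS p List.mem_cons_self) ws hws)

lemma first_word_inj : ∀ (x y : List Char) (X Y : List (List Char)), ' ' ∉ x → ' ' ∉ y →
    x ++ tailStr X = y ++ tailStr Y → x = y ∧ tailStr X = tailStr Y := by
  intro x
  induction x with
  | nil =>
    intro y X Y _ hy h
    cases y with
    | nil => exact ⟨rfl, by simpa using h⟩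
    | cons d y' =>
      exfalso
      have hd : d ≠ ' ' := fun hh => hy (hh ▸ List.mem_cons_self)
      cases X with
      | nil => simp [tailStr] at h
      | cons w Xs =>
        rw [show tailStr (w :: Xs) = ' ' :: (w ++ tailStr Xs) from by simp [tailStr]] at h
        exact hd (List.cons_eq_cons.mp (by simpa using h)).1.symm
  | cons c x' ih =>
    intro y X Y hx hy h
    cases y with
    | nil =>
      exfalso
      have hc : c ≠ ' ' := fun hh => hx (hh ▸ List.mem_cons_self)
      cases Y with
      | nil => simp [tailStr] at h
      | cons w Ys =>
        rw [show tailStr (w :: Ys) = ' ' :: (w ++ tailStr Ys) from by simp [tailStr]] at h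
        exact hc (List.cons_eq_cons.mp (by simpa using h)).1
    | cons d y' =>
      have hcd : c = d := (List.cons_eq_cons.mp (by simpa using h)).1
      have h' : x' ++ tailStr X = y' ++ tailStr Y :=
        (List.cons_eq_cons.mp (by simpa using h)).2
      obtain ⟨h1, h2⟩ := ih y' X Y (fun hh => hx (List.mem_cons_of_mem _ hh))
        (fun hh => hy (List.mem_cons_of_mem _ hh)) h'
      exact ⟨by rw [hcd, h1], h2⟩

lemma tailStr_inj : ∀ (X Y : List (List Char)), (∀ w ∈ X, ' ' ∉ w) → (∀ w ∈ Y, ' ' ∉ w) →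
    tailStr X = tailStr Y → X = Y := by
  intro X
  induction X with
  | nil =>
    intro Y _ _ h
    cases Y with
    | nil => rfl
    | cons w Ys => simp [tailStr] at h
  | cons x Xs ih =>
    intro Y hX hY h
    cases Y with
    | nil => simp [tailStr] at h
    | cons y Ys =>
      rw [show tailStr (x :: Xs) = ' ' :: (x ++ tailStr Xs) from by simp [tailStr],
        show tailStr (y :: Ys) = ' ' :: (y ++ tailStr Ys) from by simp [tailStr]] at h
      obtain ⟨h1, h2⟩ := first_word_inj x y Xs Ys (hX x List.mem_cons_self)
        (hY y List.mem_cons_self) (List.cons_eq_cons.mp h).2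
      rw [h1, ih Ys (fun w hw => hX w (List.mem_cons_of_mem _ hw))
        (fun w hw => hY w (List.mem_cons_of_mem _ hw)) h2]

-- ===== VERDICT (by name: the statement is the Claim_ definition above) =====
set_option maxHeartbeats 2000000 in
theorem format_address_spec : Claim_unchanged_format_address := by
  unfold Claim_unchanged_format_address
  intro cs _
  unfold Spec_format_address
  intro hnd
  cases cs with
  | none => rfl
  | some s =>
    have hsp := splitOn_eq s.toList
    have hs : s.toList = (splW s.toList).1 ++ tailStr (splW s.toList).2 :=
      (splW_join s.toList).symm
    have hw0 := (splW_spfree s.toList).1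
    have hrest := (splW_spfree s.toList).2
    have hpa : pvPatAll (splW s.toList).2 = false := by
      by_contra hne
      obtain ⟨t, hk, hinf⟩ := patAll_infix _ (eq_true_of_ne_false hne)
      have hinf' : (' ' :: (t ++ ' ' :: (t ++ [' ']))) <:+: s.toList := by
        rw [hs]
        exact hinf.trans (List.suffix_append _ _).isInfix
      apply hnd
      unfold D_format_address
      simp only [Option.elim_some]
      simp only [pvIsAbbrev, List.contains_iff_mem, List.mem_cons, List.not_mem_nil,
        or_false] at hk
      rcases hk with h|h|h|h|h|h|h|h|h <;>
        rw [show t = (String.ofList t).toList from String.toList_ofList.symm, h] at hinf' <;>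
        first
        | (have hx : PySem.Chars.isIn " N N ".toList s.toList = true :=
            (PySem.Chars.isIn_iff_infix _ _).mpr (by
              rw [show " N N ".toList = ' ' :: ("N".toList ++ ' ' :: ("N".toList ++ [' '])) from by decide]
              exact hinf')
           simp at hx
           simp [hx])
        | (have hx : PySem.Chars.isIn " E E ".toList s.toList = true :=
            (PySem.Chars.isIn_iff_infix _ _).mpr (by
              rw [show " E E ".toList = ' ' :: ("E".toList ++ ' ' :: ("E".toList ++ [' '])) from by decide]
              exact hinf')
           simp at hx
           simp [hx])
        | (have hx : PySem.Chars.isIn " S S ".toList s.toList = true :=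
            (PySem.Chars.isIn_iff_infix _ _).mpr (by
              rw [show " S S ".toList = ' ' :: ("S".toList ++ ' ' :: ("S".toList ++ [' '])) from by decide]
              exact hinf')
           simp at hx
           simp [hx])
        | (have hx : PySem.Chars.isIn " W W ".toList s.toList = true :=
            (PySem.Chars.isIn_iff_infix _ _).mpr (by
              rw [show " W W ".toList = ' ' :: ("W".toList ++ ' ' :: ("W".toList ++ [' '])) from by decide]
              exact hinf')
           simp at hx
           simp [hx])
        | (have hx : PySem.Chars.isIn " Rd Rd ".toList s.toList = true :=
            (PySem.Chars.isIn_iff_infix _ _).mpr (by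
              rw [show " Rd Rd ".toList = ' ' :: ("Rd".toList ++ ' ' :: ("Rd".toList ++ [' '])) from by decide]
              exact hinf')
           simp at hx
           simp [hx])
        | (have hx : PySem.Chars.isIn " St St ".toList s.toList = true :=
            (PySem.Chars.isIn_iff_infix _ _).mpr (by
              rw [show " St St ".toList = ' ' :: ("St".toList ++ ' ' :: ("St".toList ++ [' '])) from by decide]
              exact hinf')
           simp at hx
           simp [hx])
        | (have hx : PySem.Chars.isIn " Av Av ".toList s.toList = true :=
            (PySem.Chars.isIn_iff_infix _ _).mpr (by
              rw [show " Av Av ".toList = ' ' :: ("Av".toList ++ ' ' :: ("Av".toList ++ [' '])) from by decide]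
              exact hinf')
           simp at hx
           simp [hx])
        | (have hx : PySem.Chars.isIn " Blvd Blvd ".toList s.toList = true :=
            (PySem.Chars.isIn_iff_infix _ _).mpr (by
              rw [show " Blvd Blvd ".toList = ' ' :: ("Blvd".toList ++ ' ' :: ("Blvd".toList ++ [' '])) from by decide]
              exact hinf')
           simp at hx
           simp [hx])
        | (have hx : PySem.Chars.isIn " Dr Dr ".toList s.toList = true :=
            (PySem.Chars.isIn_iff_infix _ _).mpr (by
              rw [show " Dr Dr ".toList = ' ' :: ("Dr".toList ++ ' ' :: ("Dr".toList ++ [' '])) from by decide]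
              exact hinf')
           simp at hx
           simp [hx])
    have hrel : pvLongForm.map (fun p => (p.1.toList, p.2.toList))
        = pvFull.map (fun p => (' ' :: p.1, ' ' :: p.2)) := by decide
    have hcl : ∀ p ∈ pvFull, ' ' ∉ p.1 ∧ ' ' ∉ p.2 := by decide
    have h1 := fold1_bridge pvLongForm pvFull hrel hcl s _ _ hs hw0 hrest
    have hcl2 : ∀ w ∈ pvFull.foldl (fun ws p => goP p.1 p.2 false ws) (splW s.toList).2,
        ' ' ∉ w :=
      foldl_goP_spfree pvFull _ (fun p hp => (hcl p hp).2) hrest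
    have h2 := fold2_bridge pvLongForm pvFull hrel hcl _ _ _ h1 hw0 hcl2
    have h3 := folds_to_goPE pvFull (splW s.toList).2
    have hval : ∀ p ∈ pvFull, pvIsAbbrev p.2 = false := by decide
    have hkeys : ∀ p ∈ pvFull, pvIsAbbrev p.1 = true := by decide
    have h4 := fold_goPE_map pvFull hkeys hval (splW s.toList).2 hpa
    have hdisj : ∀ p ∈ pvFull, ∀ q ∈ pvFull, p.2 ≠ q.1 := by decide
    have h5 : ∀ w, pvFull.foldl (fun w p => if w = p.1 then p.2 else w) w = pvLookup w := by
      intro w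
      rw [foldl_subst_eq_find pvFull hdisj w]
      rfl
    simp only [format_address, format_address_alt, hsp]
    have hB : PySem.Chars.join [' ']
        ((splW s.toList).1 :: ((splW s.toList).2).map pvLookup)
        = (pvLongForm.foldl (fun s p =>
            if PySem.Str.endswith s p.1 then
              PySem.Str.slice s none (some (-(PySem.Str.len p.1))) ++ p.2
            else s)
          (pvLongForm.foldl (fun s p => PySem.Str.replace s (p.1 ++ " ") (p.2 ++ " ")) s)).toList := by
      have h5map : ((splW s.toList).2).map pvLookup
          = ((splW s.toList).2).map
              (fun w => pvFull.foldl (fun w p => if w = p.1 then p.2 else w) w) :=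
        List.map_congr_left (fun w _ => (h5 w).symm)
      rw [join_words, h5map, ← h4, ← h3, ← h2]
    rw [hB, String.ofList_toList]

set_option maxRecDepth 16384 in
set_option maxHeartbeats 4000000 in
theorem format_address_changed : Claim_changed_format_address := by
  unfold Claim_changed_format_address
  refine ⟨by decide, by decide, by decide, by decide, by decide⟩

set_option maxHeartbeats 2000000 in
theorem format_address_tight : Claim_exact_format_address := by
  unfold Claim_exact_format_address
  intro cs _ hD
  cases cs with
  | none => exact absurd hD (by decide)
  | some s =>
    intro hEq
    have hsp := splitOn_eq s.toList
    have hs : s.toList = (splW s.toList).1 ++ tailStr (splW s.toList).2 :=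
      (splW_join s.toList).symm
    have hw0 := (splW_spfree s.toList).1
    have hrest := (splW_spfree s.toList).2
    have hrel : pvLongForm.map (fun p => (p.1.toList, p.2.toList))
        = pvFull.map (fun p => (' ' :: p.1, ' ' :: p.2)) := by decide
    have hcl : ∀ p ∈ pvFull, ' ' ∉ p.1 ∧ ' ' ∉ p.2 := by decide
    have h1 := fold1_bridge pvLongForm pvFull hrel hcl s _ _ hs hw0 hrest
    have hcl2 : ∀ w ∈ pvFull.foldl (fun ws p => goP p.1 p.2 false ws) (splW s.toList).2,
        ' ' ∉ w :=
      foldl_goP_spfree pvFull _ (fun p hp => (hcl p hp).2) hrest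
    have h2 := fold2_bridge pvLongForm pvFull hrel hcl _ _ _ h1 hw0 hcl2
    -- the doubled abbreviation inside s
    have hT : ∃ t, ' ' ∉ t ∧ pvIsAbbrev t = true ∧ (∀ p ∈ pvFull, p.2 ≠ t)
        ∧ pvFull.any (fun p => p.1 == t) = true
        ∧ (' ' :: (t ++ ' ' :: (t ++ [' ']))) <:+: s.toList := by
      simp only [D_format_address, Option.elim_some, Bool.or_eq_true] at hD
      rcases hD with ((((((((h|h)|h)|h)|h)|h)|h)|h)|h) <;>
        first
        | exact ⟨['N'], by decide, by decide, by decide, by decide, by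
            have := (PySem.Chars.isIn_iff_infix _ _).mp h
            rwa [show " N N ".toList = ' ' :: (['N'] ++ ' ' :: (['N'] ++ [' '])) from by decide] at this⟩
        | exact ⟨['E'], by decide, by decide, by decide, by decide, by
            have := (PySem.Chars.isIn_iff_infix _ _).mp h
            rwa [show " E E ".toList = ' ' :: (['E'] ++ ' ' :: (['E'] ++ [' '])) from by decide] at this⟩
        | exact ⟨['S'], by decide, by decide, by decide, by decide, by
            have := (PySem.Chars.isIn_iff_infix _ _).mp h
            rwa [show " S S ".toList = ' ' :: (['S'] ++ ' ' :: (['S'] ++ [' '])) from by decide] at this⟩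
        | exact ⟨['W'], by decide, by decide, by decide, by decide, by
            have := (PySem.Chars.isIn_iff_infix _ _).mp h
            rwa [show " W W ".toList = ' ' :: (['W'] ++ ' ' :: (['W'] ++ [' '])) from by decide] at this⟩
        | exact ⟨['R','d'], by decide, by decide, by decide, by decide, by
            have := (PySem.Chars.isIn_iff_infix _ _).mp h
            rwa [show " Rd Rd ".toList = ' ' :: (['R','d'] ++ ' ' :: (['R','d'] ++ [' '])) from by decide] at this⟩
        | exact ⟨['S','t'], by decide, by decide, by decide, by decide, by
            have := (PySem.Chars.isIn_iff_infix _ _).mp h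
            rwa [show " St St ".toList = ' ' :: (['S','t'] ++ ' ' :: (['S','t'] ++ [' '])) from by decide] at this⟩
        | exact ⟨['A','v'], by decide, by decide, by decide, by decide, by
            have := (PySem.Chars.isIn_iff_infix _ _).mp h
            rwa [show " Av Av ".toList = ' ' :: (['A','v'] ++ ' ' :: (['A','v'] ++ [' '])) from by decide] at this⟩
        | exact ⟨['B','l','v','d'], by decide, by decide, by decide, by decide, by
            have := (PySem.Chars.isIn_iff_infix _ _).mp h
            rwa [show " Blvd Blvd ".toList = ' ' :: (['B','l','v','d'] ++ ' ' :: (['B','l','v','d'] ++ [' '])) from by decide] at this⟩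
        | exact ⟨['D','r'], by decide, by decide, by decide, by decide, by
            have := (PySem.Chars.isIn_iff_infix _ _).mp h
            rwa [show " Dr Dr ".toList = ' ' :: (['D','r'] ++ ' ' :: (['D','r'] ++ [' '])) from by decide] at this⟩
    obtain ⟨t, ht1, ht2, ht3, ht4, hinf⟩ := hT
    -- equality of the two returned strings, word by word
    simp only [format_address, format_address_alt, hsp] at hEq
    have hlist := congrArg String.toList (Option.some.inj hEq)
    rw [String.toList_ofList, h2, join_words] at hlist
    have hXY := tailStr_inj _ _
      (foldl_endfix_spfree pvFull _ (fun p hp => (hcl p hp).2) hcl2)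
      (fun w hw => by
        obtain ⟨x, hx, hxe⟩ := List.mem_map.mp hw
        exact hxe ▸ pvLookup_spfree x (hrest x hx))
      (List.append_cancel_left hlist)
    -- A keeps the second abbreviation of the pair, B never keeps one
    have hpat := infix_patK t ht1 s.toList hinf
    have hmem : t ∈ pvFull.foldl (fun ws p => goPE p.1 p.2 false ws) (splW s.toList).2 :=
      fold_reach t pvFull _ ht3 (Or.inl ⟨ht4, by decide, hpat⟩)
    rw [← folds_to_goPE, hXY] at hmem
    obtain ⟨x, _, hxe⟩ := List.mem_map.mp hmem
    have hfalse := lookup_not_abbrev x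
    rw [hxe] at hfalse
    rw [hfalse] at ht2
    cases ht2
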